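-- pv_equiv track=rewrite | github.com/sm2774us/competitive_programming | Arrays/036_leetcode_P_1589_MaximumSumObtainedOfAnyPermutation/Solution.py | maxSumRangeQuery_solution_1
-- ===== SOURCE A (Python) =====
-- from typing import List
--
-- def maxSumRangeQuery_solution_1(
--     nums: List[int], requests: List[List[int]]
-- ) -> int:
--     n = len(nums)
--     count = [0] * (n + 1)
--     for i, j in requests:
--         count[i] += 1
--         count[j + 1] -= 1
--     for i in range(1, n + 1):
--         count[i] += count[i - 1]
--     res = 0
--     for v, c in zip(sorted(count[:-1]), sorted(nums)):
--         res += v * c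
--     return res % (10 ** 9 + 7)
-- ===== SOURCE B (Python) =====
-- from typing import List
--
--
-- def _pair_sum(counts, nums):
--     res = 0
--     for v, c in zip(sorted(counts), sorted(nums)):
--         res += v * c
--     return res % (10 ** 9 + 7)
--
--
-- def maxSumRangeQuery_solution_1(
--     nums: List[int], requests: List[List[int]]
-- ) -> int:
--     counts = [0] * len(nums)
--     for i, j in requests:
--         for k in range(i, j + 1):
--             counts[k] += 1
--     return _pair_sum(counts, nums)
-- ===== Notes on version B (the rewrite author's own statement) =====
-- stated objective: alternative
-- what changed: The coverage counts are computed by a direct per-request scan incrementing counts[k] for each k in i..j, replacing A's difference-array point updates followed by a prefix-sum accumulation pass; the sort-zip-multiply tail is unchanged.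
-- outside the precondition, e.g. on maxSumRangeQuery_solution_1([1, 2], [[-1, 0]]): A returns 1000000006, B returns 3; on maxSumRangeQuery_solution_1([1, 2, 3], [[2, 0]]): A returns 1000000006, B returns 0
import Mathlib
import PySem

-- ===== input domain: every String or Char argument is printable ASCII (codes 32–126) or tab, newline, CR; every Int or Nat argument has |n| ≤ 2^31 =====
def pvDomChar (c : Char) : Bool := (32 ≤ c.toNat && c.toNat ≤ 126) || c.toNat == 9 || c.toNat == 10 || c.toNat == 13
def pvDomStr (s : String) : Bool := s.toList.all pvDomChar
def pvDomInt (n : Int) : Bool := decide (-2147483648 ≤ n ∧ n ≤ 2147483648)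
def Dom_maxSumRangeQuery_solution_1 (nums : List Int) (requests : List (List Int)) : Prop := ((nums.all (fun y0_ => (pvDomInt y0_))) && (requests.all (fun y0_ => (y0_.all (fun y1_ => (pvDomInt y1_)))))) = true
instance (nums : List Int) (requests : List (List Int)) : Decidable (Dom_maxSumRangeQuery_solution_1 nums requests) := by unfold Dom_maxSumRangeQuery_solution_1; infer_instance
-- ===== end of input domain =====

-- B replaces A's difference-array-plus-prefix-sum coverage count with a direct per-request
-- range scan (objective: alternative); equivalence is claimed on well-formed requests (Pre_).

-- ===== PORT A =====
-- 'count[idx] += w' (read-modify-write; in range under Pre_, where Python would not raise)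
def pvAddAt (c : List Int) (idx w : Int) : List Int :=
  PySem.List.pySetD c idx (PySem.List.pyGetD c idx 0 + w)

-- one iteration of 'for i, j in requests' (non-pair rows raise in Python: outside Pre_)
def pvAStep (c : List Int) (r : List Int) : List Int :=
  match r with
  | [i, j] => pvAddAt (pvAddAt c i 1) (j + 1) (-1)
  | _ => c

def maxSumRangeQuery_solution_1 (nums : List Int) (requests : List (List Int)) : Int :=
  let n := nums.length
  let count0 := List.replicate (n + 1) (0 : Int)
  -- for i, j in requests: count[i] += 1; count[j+1] -= 1
  let count1 := requests.foldl pvAStep count0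
  -- for i in range(1, n+1): count[i] += count[i-1]
  let count2 := (PySem.List.pyRange 1 ((n : Int) + 1) 1).foldl
    (fun c i => PySem.List.pySetD c i (PySem.List.pyGetD c i 0 + PySem.List.pyGetD c (i - 1) 0)) count1
  -- res over zip(sorted(count[:-1]), sorted(nums))
  let res := ((PySem.List.sorted (PySem.List.slice count2 none (some (-1))) (fun x => x)).zip
      (PySem.List.sorted nums (fun x => x))).foldl (fun r p => r + p.1 * p.2) 0
  PySem.Int.mod res (10 ^ 9 + 7)

-- ===== PORT B =====
-- for k in range(i, j+1): counts[k] += 1   (indices in range under Pre_)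
def pvAddRange (c : List Int) (i j : Int) : List Int :=
  (PySem.List.pyRange i (j + 1) 1).foldl
    (fun c k => PySem.List.pySetD c k (PySem.List.pyGetD c k 0 + 1)) c

def pvPairSum (counts nums : List Int) : Int :=
  PySem.Int.mod
    (((PySem.List.sorted counts (fun x => x)).zip (PySem.List.sorted nums (fun x => x))).foldl
      (fun r p => r + p.1 * p.2) 0) (10 ^ 9 + 7)

-- one iteration of 'for i, j in requests' (non-pair rows raise in Python: outside Pre_)
def pvBStep (c : List Int) (r : List Int) : List Int :=
  match r with
  | [i, j] => pvAddRange c i j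
  | _ => c

def maxSumRangeQuery_solution_1_alt (nums : List Int) (requests : List (List Int)) : Int :=
  let counts := requests.foldl pvBStep (List.replicate nums.length (0 : Int))
  pvPairSum counts nums

-- ===== PRECONDITION & SPEC =====
-- Pre_ admits exactly the well-formed inputs: each request is a pair [i, j] with 0 ≤ i ≤ j < len(nums).
-- Outside it A either raises (IndexError on out-of-range indices, ValueError on non-pair rows) or
-- returns values that are artefacts of negative-index wraparound / negative difference-array counts
-- on reversed requests, which B's direct counting does not reproduce.
def Pre_maxSumRangeQuery_solution_1 (nums : List Int) (requests : List (List Int)) : Prop :=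
  ∀ r ∈ requests, r.length = 2 ∧ 0 ≤ r.getD 0 0 ∧ r.getD 0 0 ≤ r.getD 1 0 ∧ r.getD 1 0 < (nums.length : Int)
instance (nums : List Int) (requests : List (List Int)) : Decidable (Pre_maxSumRangeQuery_solution_1 nums requests) := by
  unfold Pre_maxSumRangeQuery_solution_1; infer_instance

def pvWitness_maxSumRangeQuery_solution_1 : List Int × List (List Int) := ([1, 2, 3], [[0, 1], [1, 2]])

def Spec_maxSumRangeQuery_solution_1 (nums : List Int) (requests : List (List Int)) (out : Int) : Prop := out = maxSumRangeQuery_solution_1_alt nums requests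
instance (nums : List Int) (requests : List (List Int)) (out : Int) : Decidable (Spec_maxSumRangeQuery_solution_1 nums requests out) := by unfold Spec_maxSumRangeQuery_solution_1; infer_instance

-- ===== CLAIM (what is proved, stated in full; the proofs are below) =====
def Claim_equal_maxSumRangeQuery_solution_1 : Prop := ∀ (nums : List Int) (requests : List (List Int)), Dom_maxSumRangeQuery_solution_1 nums requests → Pre_maxSumRangeQuery_solution_1 nums requests → Spec_maxSumRangeQuery_solution_1 nums requests (maxSumRangeQuery_solution_1 nums requests)

-- ===== LEMMAS AND PROOFS =====

-- coverage count of position k by the requests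
def pvCov (requests : List (List Int)) (k : Nat) : Int :=
  (requests.map (fun r => if r.getD 0 0 ≤ (k : Int) ∧ (k : Int) ≤ r.getD 1 0 then (1 : Int) else 0)).sum

-- difference-array contribution of the requests at slot m
def pvD1 (r : List Int) (m : Nat) : Int :=
  (if r.getD 0 0 = (m : Int) then 1 else 0) + (if r.getD 1 0 + 1 = (m : Int) then -1 else 0)
def pvDC (requests : List (List Int)) (m : Nat) : Int := (requests.map (fun r => pvD1 r m)).sum

lemma pv_step_length (c : List Int) (t v : Int) :
    (PySem.List.pySetD c t v).length = c.length := by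
  simp [PySem.List.length_pySetD]

lemma pv_step_getD (c : List Int) (t : Int) (h0 : 0 ≤ t) (hl : t < (c.length : Int)) (v : Int) (k : Nat) :
    (PySem.List.pySetD c t v).getD k 0 = if (k : Int) = t then v else c.getD k 0 := by
  rw [PySem.List.pySetD_of_nonneg c v h0]
  have ht : t.toNat < c.length := by omega
  rw [List.getD_eq_getElem?_getD, List.getD_eq_getElem?_getD, List.getElem?_set]
  split_ifs with h1 h2 <;> simp_all <;> omega

-- reading back the just-written cell
lemma pv_getD_read (c : List Int) (t : Int) (h0 : 0 ≤ t) (hl : t < (c.length : Int)) :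
    PySem.List.pyGetD c t 0 = c.getD t.toNat 0 := by
  rw [PySem.List.pyGetD_eq_getElem c 0 h0 hl, List.getD_eq_getElem]

lemma pv_foldl_length {β : Type} (f : List Int → β → List Int)
    (hf : ∀ c x, (f c x).length = c.length) (l : List β) (c : List Int) :
    (l.foldl f c).length = c.length := by
  induction l generalizing c with
  | nil => rfl
  | cons x xs ih => rw [List.foldl_cons, ih, hf]

lemma pvAddAt_length (c : List Int) (idx w : Int) : (pvAddAt c idx w).length = c.length := by
  unfold pvAddAt; exact pv_step_length c idx _

lemma pvAddAt_getD (c : List Int) (idx w : Int) (h0 : 0 ≤ idx) (hl : idx < (c.length : Int)) (k : Nat) :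
    (pvAddAt c idx w).getD k 0 = c.getD k 0 + (if (k : Int) = idx then w else 0) := by
  unfold pvAddAt
  rw [pv_step_getD c idx h0 hl _ k, pv_getD_read c idx h0 hl]
  split_ifs with h
  · have : idx.toNat = k := by omega
    rw [this]
  · ring

lemma pvAddRange_length (c : List Int) (i j : Int) : (pvAddRange c i j).length = c.length := by
  unfold pvAddRange
  exact pv_foldl_length _ (fun c x => pv_step_length c x _) _ c

lemma pvAddRange_getD (c : List Int) (i j : Int) (h0 : 0 ≤ i) (hl : j < (c.length : Int)) (k : Nat) (hk : k < c.length) :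
    (pvAddRange c i j).getD k 0 = c.getD k 0 + (if i ≤ (k : Int) ∧ (k : Int) ≤ j then 1 else 0) := by
  generalize hN : (j + 1 - i).toNat = N
  induction N generalizing c i with
  | zero =>
    have hij : j + 1 ≤ i := by omega
    unfold pvAddRange
    rw [PySem.List.pyRange_one_eq_nil hij]
    have : ¬ (i ≤ (k : Int) ∧ (k : Int) ≤ j) := by omega
    simp [this]
  | succ N ih =>
    have hij : i < j + 1 := by omega
    unfold pvAddRange
    rw [PySem.List.pyRange_one_cons hij, List.foldl_cons]
    have hlen : (PySem.List.pySetD c i (PySem.List.pyGetD c i 0 + 1)).length = c.length :=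
      pv_step_length c i _
    have hih := ih (PySem.List.pySetD c i (PySem.List.pyGetD c i 0 + 1)) (i + 1)
      (by omega) (by rw [hlen]; exact hl) (by rw [hlen]; exact hk) (by omega)
    unfold pvAddRange at hih
    rw [hih, pv_step_getD c i h0 (by omega) _ k, pv_getD_read c i h0 (by omega)]
    by_cases hki : (k : Int) = i
    · have hkt : i.toNat = k := by omega
      rw [if_pos hki, hkt, if_neg (show ¬((i + 1 ≤ (k : Int)) ∧ ((k : Int) ≤ j)) by omega),
        if_pos (show (i ≤ (k : Int)) ∧ ((k : Int) ≤ j) by omega)]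
      ring
    · rw [if_neg hki]
      have hiff : ((i + 1 ≤ (k : Int) ∧ (k : Int) ≤ j)) ↔ ((i ≤ (k : Int) ∧ (k : Int) ≤ j)) := by omega
      rw [if_congr hiff rfl rfl]

lemma pvBFold_length (reqs : List (List Int)) (c : List Int) :
    (reqs.foldl pvBStep c).length = c.length := by
  apply pv_foldl_length
  intro c r
  match r with
  | [] => rfl
  | [_] => rfl
  | [i, j] => exact pvAddRange_length c i j
  | _ :: _ :: _ :: _ => rfl


lemma pvBFold_getD (reqs : List (List Int)) (c : List Int)
    (h : ∀ r ∈ reqs, r.length = 2 ∧ 0 ≤ r.getD 0 0 ∧ r.getD 0 0 ≤ r.getD 1 0 ∧ r.getD 1 0 < (c.length : Int))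
    (k : Nat) (hk : k < c.length) :
    (reqs.foldl pvBStep c).getD k 0
      = c.getD k 0 + pvCov reqs k := by
  induction reqs generalizing c with
  | nil => simp [pvCov]
  | cons r rs ih =>
    have hr := h r (List.mem_cons_self)
    obtain ⟨a, b, rfl⟩ := List.length_eq_two.mp hr.1
    have ha : (0:Int) ≤ a := by simpa using hr.2.1
    have hb : b < (c.length : Int) := by simpa using hr.2.2.2
    rw [List.foldl_cons, show pvBStep c [a, b] = pvAddRange c a b from rfl]
    have hlen := pvAddRange_length c a b
    rw [ih (pvAddRange c a b)
      (fun r' hr' => by rw [hlen]; exact h r' (List.mem_cons_of_mem _ hr')) (by rw [hlen]; exact hk)]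
    rw [pvAddRange_getD c a b ha hb k hk]
    simp only [pvCov, List.map_cons, List.sum_cons, List.getD_cons_zero, List.getD_cons_succ]
    ring

lemma pvAFold_length (reqs : List (List Int)) (c : List Int) :
    (reqs.foldl pvAStep c).length = c.length := by
  apply pv_foldl_length
  intro c r
  match r with
  | [] => rfl
  | [_] => rfl
  | [i, j] => show (pvAddAt (pvAddAt c i 1) (j + 1) (-1)).length = c.length
              rw [pvAddAt_length, pvAddAt_length]
  | _ :: _ :: _ :: _ => rfl

lemma pvAFold_getD (reqs : List (List Int)) (c : List Int)
    (h : ∀ r ∈ reqs, r.length = 2 ∧ 0 ≤ r.getD 0 0 ∧ r.getD 0 0 ≤ r.getD 1 0 ∧ r.getD 1 0 + 1 < (c.length : Int))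
    (k : Nat) (hk : k < c.length) :
    (reqs.foldl pvAStep c).getD k 0
      = c.getD k 0 + pvDC reqs k := by
  induction reqs generalizing c with
  | nil => simp [pvDC]
  | cons r rs ih =>
    have hr := h r (List.mem_cons_self)
    obtain ⟨a, b, rfl⟩ := List.length_eq_two.mp hr.1
    have ha : (0:Int) ≤ a := by simpa using hr.2.1
    have hab : a ≤ b := by simpa using hr.2.2.1
    have hb : b + 1 < (c.length : Int) := by simpa using hr.2.2.2
    rw [List.foldl_cons, show pvAStep c [a, b] = pvAddAt (pvAddAt c a 1) (b + 1) (-1) from rfl]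
    have hlen : (pvAddAt (pvAddAt c a 1) (b + 1) (-1)).length = c.length := by
      rw [pvAddAt_length, pvAddAt_length]
    rw [ih (pvAddAt (pvAddAt c a 1) (b + 1) (-1))
      (fun r' hr' => by rw [hlen]; exact h r' (List.mem_cons_of_mem _ hr')) (by rw [hlen]; exact hk)]
    rw [pvAddAt_getD _ (b + 1) (-1) (by omega) (by rw [pvAddAt_length]; exact hb) k]
    rw [pvAddAt_getD c a 1 ha (by omega) k]
    simp only [pvDC, pvD1, List.map_cons, List.sum_cons, List.getD_cons_zero, List.getD_cons_succ]
    split_ifs <;> omega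

lemma pvPFold_getD (c : List Int) (n : Nat) (hc : c.length = n + 1) (k : Nat) (hk : k ≤ n) :
    ((PySem.List.pyRange 1 ((n : Int) + 1) 1).foldl
      (fun c i => PySem.List.pySetD c i (PySem.List.pyGetD c i 0 + PySem.List.pyGetD c (i - 1) 0)) c).getD k 0
      = ∑ m ∈ Finset.range (k + 1), c.getD m 0 := by
  have aux : ∀ (t : Nat), t ≤ n → ∀ (k : Nat), k < c.length →
      ((PySem.List.pyRange 1 ((t : Int) + 1) 1).foldl
        (fun c i => PySem.List.pySetD c i (PySem.List.pyGetD c i 0 + PySem.List.pyGetD c (i - 1) 0)) c).getD k 0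
      = if k ≤ t then ∑ m ∈ Finset.range (k + 1), c.getD m 0 else c.getD k 0 := by
    intro t
    induction t with
    | zero =>
      intro _ k hk
      rw [PySem.List.pyRange_one_eq_nil (by omega)]
      simp only [List.foldl_nil, Nat.le_zero]
      split_ifs with h0
      · subst h0; rw [Finset.sum_range_one]
      · rfl
    | succ t iht =>
      intro ht k hk
      have hsplit : PySem.List.pyRange 1 (((t : Nat) + 1 : Nat) + 1 : Int) 1
          = PySem.List.pyRange 1 ((t : Int) + 1) 1 ++ [(t : Int) + 1] := by
        push_cast
        exact PySem.List.pyRange_one_succ_right (by omega)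
      rw [show ((((t : Nat) + 1 : Nat) : Int) + 1) = (((t : Nat) + 1 : Nat) + 1 : Int) by push_cast; ring,
        hsplit, List.foldl_append, List.foldl_cons, List.foldl_nil]
      set P := (PySem.List.pyRange 1 ((t : Int) + 1) 1).foldl
        (fun c i => PySem.List.pySetD c i (PySem.List.pyGetD c i 0 + PySem.List.pyGetD c (i - 1) 0)) c with hP
      have hlenP : P.length = c.length := by
        rw [hP]; exact pv_foldl_length _ (fun c x => pv_step_length c x _) _ c
      have htc : ((t : Int) + 1) < (P.length : Int) := by rw [hlenP]; omega
      rw [pv_step_getD P ((t : Int) + 1) (by omega) htc _ k]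
      have hrdhi : PySem.List.pyGetD P ((t : Int) + 1) 0 = P.getD (t + 1) 0 := by
        rw [pv_getD_read P ((t : Int) + 1) (by omega) htc]
        norm_num
      have hrdlo : PySem.List.pyGetD P ((t : Int) + 1 - 1) 0 = P.getD t 0 := by
        rw [show ((t : Int) + 1 - 1) = (t : Int) by ring,
          pv_getD_read P (t : Int) (by omega) (by rw [hlenP]; omega)]
        norm_num
    
      rw [hrdhi, hrdlo, iht (by omega) (t + 1) (by omega), iht (by omega) t (by omega),
        if_neg (show ¬(t + 1 ≤ t) by omega), if_pos (le_refl t)]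
      by_cases hk1 : (k : Int) = (t : Int) + 1
      · rw [if_pos hk1]
        have hkt : k = t + 1 := by omega
        subst hkt
        rw [if_pos (le_refl (t + 1)),
          show (∑ m ∈ Finset.range (t + 1 + 1), c.getD m 0)
            = (∑ m ∈ Finset.range (t + 1), c.getD m 0) + c.getD (t + 1) 0 from
          Finset.sum_range_succ _ _]
        ring
      · rw [if_neg hk1, iht (by omega) k hk]
        by_cases hk2 : k ≤ t
        · rw [if_pos hk2, if_pos (by omega)]
        · rw [if_neg hk2, if_neg (by omega)]
  rw [aux n (le_refl n) k (by omega), if_pos hk]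

lemma pv_sum_dc_eq_cov (reqs : List (List Int)) (n : Nat)
    (h : ∀ r ∈ reqs, r.length = 2 ∧ 0 ≤ r.getD 0 0 ∧ r.getD 0 0 ≤ r.getD 1 0 ∧ r.getD 1 0 < (n : Int))
    (k : Nat) :
    ∑ m ∈ Finset.range (k + 1), pvDC reqs m = pvCov reqs k := by
  have e1 : ∀ (x : Int), 0 ≤ x →
      (∑ m ∈ Finset.range (k + 1), if x = (m : Int) then (1 : Int) else 0)
        = if x ≤ (k : Int) then 1 else 0 := by
    intro x hx
    have hc : ∀ m ∈ Finset.range (k + 1), (if x = (m : Int) then (1 : Int) else 0)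
        = if x.toNat = m then 1 else 0 := by
      intro m _
      split_ifs <;> omega
    rw [Finset.sum_congr rfl hc, Finset.sum_ite_eq]
    simp only [Finset.mem_range]
    split_ifs <;> omega
  induction reqs with
  | nil => simp [pvDC, pvCov]
  | cons r rs ih =>
    have hr := h r (List.mem_cons_self)
    obtain ⟨a, b, rfl⟩ := List.length_eq_two.mp hr.1
    have ha : (0:Int) ≤ a := by simpa using hr.2.1
    have hab : a ≤ b := by simpa using hr.2.2.1
    have hdc : (∑ m ∈ Finset.range (k + 1), pvDC ([a, b] :: rs) m)
        = (∑ m ∈ Finset.range (k + 1), pvD1 [a, b] m) + ∑ m ∈ Finset.range (k + 1), pvDC rs m := by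
      rw [← Finset.sum_add_distrib]
      exact Finset.sum_congr rfl (fun m _ => by simp [pvDC])
    rw [hdc, ih (fun r' hr' => h r' (List.mem_cons_of_mem _ hr'))]
    have hsingle : (∑ m ∈ Finset.range (k + 1), pvD1 [a, b] m)
        = if ([a, b] : List Int).getD 0 0 ≤ (k : Int) ∧ (k : Int) ≤ ([a, b] : List Int).getD 1 0
          then 1 else 0 := by
      simp only [pvD1, List.getD_cons_zero, List.getD_cons_succ]
      rw [Finset.sum_add_distrib, e1 a ha]
      have : (∑ m ∈ Finset.range (k + 1), if b + 1 = (m : Int) then (-1 : Int) else 0)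
          = -(if b + 1 ≤ (k : Int) then 1 else 0) := by
        rw [← e1 (b + 1) (by omega), ← Finset.sum_neg_distrib]
        exact Finset.sum_congr rfl (fun m _ => by split_ifs <;> ring)
      rw [this]
      split_ifs <;> omega
    rw [hsingle]
    simp only [pvCov, List.map_cons, List.sum_cons]

lemma pv_dropLast_getD (l : List Int) (k : Nat) (h : k < l.length - 1) :
    l.dropLast.getD k 0 = l.getD k 0 := by
  rw [List.getD_eq_getElem?_getD, List.getD_eq_getElem?_getD, List.getElem?_dropLast, if_pos h]

lemma pv_getD_replicate (m n : Nat) : (List.replicate n (0 : Int)).getD m 0 = 0 := by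
  rw [List.getD_eq_getElem?_getD, List.getElem?_replicate]
  split_ifs <;> rfl

lemma pv_counts_eq (nums : List Int) (requests : List (List Int))
    (hpre : Pre_maxSumRangeQuery_solution_1 nums requests) :
    PySem.List.slice
      ((PySem.List.pyRange 1 ((nums.length : Int) + 1) 1).foldl
        (fun c i => PySem.List.pySetD c i (PySem.List.pyGetD c i 0 + PySem.List.pyGetD c (i - 1) 0))
        (requests.foldl pvAStep (List.replicate (nums.length + 1) (0 : Int)))) none (some (-1))
      = requests.foldl pvBStep (List.replicate nums.length (0 : Int)) := by
  set n := nums.length with hn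
  set A1 := requests.foldl pvAStep (List.replicate (n + 1) (0 : Int)) with hA1
  set A2 := (PySem.List.pyRange 1 ((n : Int) + 1) 1).foldl
    (fun c i => PySem.List.pySetD c i (PySem.List.pyGetD c i 0 + PySem.List.pyGetD c (i - 1) 0)) A1 with hA2
  set B1 := requests.foldl pvBStep (List.replicate n (0 : Int)) with hB1
  have hlA1 : A1.length = n + 1 := by
    rw [hA1, pvAFold_length, List.length_replicate]
  have hlA2 : A2.length = n + 1 := by
    rw [hA2, pv_foldl_length _ (fun c x => pv_step_length c x _), hlA1]
  have hlB1 : B1.length = n := by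
    rw [hB1, pvBFold_length, List.length_replicate]
  rw [PySem.List.slice_to_neg_one]
  apply List.ext_getElem (by simp [hlA2, hlB1])
  intro k h1 h2
  have hkn : k < n := by simpa [hlB1] using h2
  rw [← List.getD_eq_getElem _ 0 h1, ← List.getD_eq_getElem _ 0 h2]
  rw [pv_dropLast_getD _ _ (by omega)]
  rw [hA2, pvPFold_getD A1 n hlA1 k (by omega)]
  have hAm : ∀ m ∈ Finset.range (k + 1), A1.getD m 0 = pvDC requests m := by
    intro m hm
    simp only [Finset.mem_range] at hm
    rw [hA1, pvAFold_getD requests _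
      (by
        intro r hr
        obtain ⟨e1, e2, e3, e4⟩ := hpre r hr
        exact ⟨e1, e2, e3, by rw [List.length_replicate]; omega⟩)
      m (by rw [List.length_replicate]; omega), pv_getD_replicate, zero_add]
  rw [Finset.sum_congr rfl hAm, pv_sum_dc_eq_cov requests n hpre k]
  rw [hB1, pvBFold_getD requests _
    (by
      intro r hr
      obtain ⟨e1, e2, e3, e4⟩ := hpre r hr
      exact ⟨e1, e2, e3, by rw [List.length_replicate]; omega⟩)
    k (by rw [List.length_replicate]; omega), pv_getD_replicate, zero_add]

-- ===== VERDICT (by name: the statement is the Claim_ definition above) =====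
theorem maxSumRangeQuery_solution_1_spec : Claim_equal_maxSumRangeQuery_solution_1 := by
  intro nums requests _ hpre
  unfold Spec_maxSumRangeQuery_solution_1 maxSumRangeQuery_solution_1 maxSumRangeQuery_solution_1_alt pvPairSum
  dsimp only
  rw [pv_counts_eq nums requests hpre]
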